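-- pv_equiv track=rewrite | github.com/Rohanchaudhari98/DSCI-553-Data-Mining | Assignment2/task2.py | get_frequent_itemset_singleton
-- ===== SOURCE A (Python) =====
-- def get_frequent_itemset_singleton(partition,par_threshold):
-- 	new_s = set()
-- 	final = set()
-- 	for i in partition:
-- 		temp = set(i)
-- 		new_s = new_s.union(temp)
-- 	for i in new_s:
-- 		cnt = 0*0
-- 		for j in partition:
-- 			if i in j:
-- 				cnt = (cnt + 1 + 0)*1
-- 		if cnt >= par_threshold:
-- 			final.add(frozenset({i}))
-- 	return final
-- ===== SOURCE B (Python) =====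
-- def get_frequent_itemset_singleton(partition, par_threshold):
--     # One pass: flatten the deduped baskets, count with a dict, then filter.
--     flat = []
--     for basket in partition:
--         flat.extend(set(basket))
--     counts = {}
--     for item in flat:
--         counts[item] = counts.get(item, 0) + 1
--     res = set()
--     for item, c in counts.items():
--         if c >= par_threshold:
--             res.add(frozenset({item}))
--     return res
-- ===== Notes on version B (the rewrite author's own statement) =====
-- stated objective: faster
-- what changed: Replaces A's per-item rescan of all baskets (for each distinct item, count membership across every basket) with a single pass that flattens the deduped baskets and builds a count dictionary once, then filters it.
import Mathlib
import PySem

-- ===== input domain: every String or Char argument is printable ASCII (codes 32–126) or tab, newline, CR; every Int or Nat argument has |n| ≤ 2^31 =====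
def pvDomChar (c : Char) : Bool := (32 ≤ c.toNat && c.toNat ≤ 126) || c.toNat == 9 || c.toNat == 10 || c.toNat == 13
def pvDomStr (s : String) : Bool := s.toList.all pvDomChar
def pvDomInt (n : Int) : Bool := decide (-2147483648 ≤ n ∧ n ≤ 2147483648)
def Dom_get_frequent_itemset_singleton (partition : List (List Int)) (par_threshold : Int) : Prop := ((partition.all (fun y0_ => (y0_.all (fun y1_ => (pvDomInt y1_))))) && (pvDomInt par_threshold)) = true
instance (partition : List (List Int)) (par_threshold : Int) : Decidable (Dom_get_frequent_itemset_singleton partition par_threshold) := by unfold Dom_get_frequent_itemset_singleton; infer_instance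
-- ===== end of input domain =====

-- B builds the item counts once in a single pass over the baskets instead of A's rescan
-- of every basket for every distinct item (objective: faster, asymptotic).

-- ===== PORT A =====
def get_frequent_itemset_singleton (partition : List (List Int)) (par_threshold : Int) : List (List Int) :=
  -- new_s = set(); for i in partition: new_s = new_s.union(set(i))
  let new_s : PySem.Set Int :=
    partition.foldl (fun s i => PySem.Set.union s (PySem.Set.ofList i)) PySem.Set.empty
  -- final = set(); for i in new_s: cnt = …; if cnt >= par_threshold: final.add(frozenset({i}))
  new_s.foldl (fun final i =>
    let cnt : Int :=
      partition.foldl (fun c j => if i ∈ j then (c + 1 + 0) * 1 else c) (0 * 0)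
    if cnt ≥ par_threshold then PySem.Set.add final [i] else final) PySem.Set.empty

-- ===== PORT B =====
def get_frequent_itemset_singleton_alt (partition : List (List Int)) (par_threshold : Int) : List (List Int) :=
  -- flat = []; for basket in partition: flat.extend(set(basket))
  let flat : List Int :=
    partition.foldl (fun acc basket => acc ++ PySem.Set.ofList basket) []
  -- counts = {}; for item in flat: counts[item] = counts.get(item, 0) + 1
  let counts : PySem.Dict Int Int :=
    flat.foldl (fun d x => d.insert x (d.getD x 0 + 1)) PySem.Dict.empty
  -- res = set(); for item, c in counts.items(): if c >= par_threshold: res.add(frozenset({item}))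
  counts.items.foldl (fun res p =>
    if p.2 ≥ par_threshold then PySem.Set.add res [p.1] else res) PySem.Set.empty

-- ===== PRECONDITION & SPEC =====
def Spec_get_frequent_itemset_singleton (partition : List (List Int)) (par_threshold : Int) (out : List (List Int)) : Prop := out = get_frequent_itemset_singleton_alt partition par_threshold
instance (partition : List (List Int)) (par_threshold : Int) (out : List (List Int)) : Decidable (Spec_get_frequent_itemset_singleton partition par_threshold out) := by unfold Spec_get_frequent_itemset_singleton; infer_instance

-- ===== CLAIM (what is proved, stated in full; the proofs are below) =====
def Claim_equal_get_frequent_itemset_singleton : Prop := ∀ (partition : List (List Int)) (par_threshold : Int), Dom_get_frequent_itemset_singleton partition par_threshold → Spec_get_frequent_itemset_singleton partition par_threshold (get_frequent_itemset_singleton partition par_threshold)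

-- ===== LEMMAS AND PROOFS =====

-- A's union loop builds exactly set(flat) for B's flattened list.
theorem foldl_union_eq_update {P : List (List Int)} :
    ∀ (s : PySem.Set Int),
      P.foldl (fun s i => PySem.Set.union s (PySem.Set.ofList i)) s
        = PySem.Set.update s (P.flatMap (fun b => PySem.Set.ofList b)) := by
  induction P with
  | nil => intro s; simp [PySem.Set.update_nil]
  | cons b P ih =>
      intro s
      rw [List.foldl_cons, ih, List.flatMap_cons]
      simp only [PySem.Set.union]
      rw [PySem.Set.update_append]

-- a Nodup list counts each element 0 or 1 times
theorem count_ofList (b : List Int) (i : Int) :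
    (PySem.Set.ofList b).count i = if i ∈ b then 1 else 0 := by
  by_cases h : i ∈ b
  · simp only [h, if_true]
    have hm : i ∈ PySem.Set.ofList b := (PySem.Set.mem_ofList b i).2 h
    exact List.count_eq_one_of_mem (PySem.Set.nodup_ofList b) hm
  · simp only [h, if_false]
    simp [List.count_eq_zero, PySem.Set.mem_ofList, h]

-- the flattened deduped list counts each item once per basket containing it
theorem count_flat (P : List (List Int)) (i : Int) :
    (P.flatMap (fun b => PySem.Set.ofList b)).count i
      = P.countP (fun j => decide (i ∈ j)) := by
  induction P with
  | nil => simp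
  | cons b P ih =>
      simp only [List.flatMap_cons, List.count_append, ih, List.countP_cons,
        count_ofList]
      by_cases h : i ∈ b <;> simp [h] <;> omega

-- A's inner counting loop is the basket-membership count
theorem cntA_eq (P : List (List Int)) (i : Int) :
    P.foldl (fun c j => if i ∈ j then (c + 1 + 0) * 1 else c) ((0 : Int) * 0)
      = ((P.countP (fun j => decide (i ∈ j)) : Nat) : Int) := by
  have h : (fun (c : Int) (j : List Int) => if i ∈ j then (c + 1 + 0) * 1 else c)
      = (fun (c : Int) (j : List Int) => if decide (i ∈ j) = true then c + 1 else c) := by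
    funext c j
    by_cases hj : i ∈ j
    · simp only [hj, decide_true, if_true]; ring
    · simp [hj]
  rw [h, PySem.List.foldl_count_if (fun j => decide (i ∈ j)) P (0 * 0)]
  simp

theorem get_frequent_itemset_singleton_eq (partition : List (List Int)) (par_threshold : Int) :
    get_frequent_itemset_singleton partition par_threshold
      = get_frequent_itemset_singleton_alt partition par_threshold := by
  unfold get_frequent_itemset_singleton get_frequent_itemset_singleton_alt
  simp only [PySem.List.foldl_append_eq_flatMap, List.nil_append,
    PySem.Dict.foldl_insert_getD_add_one_eq_counter, PySem.Dict.items_counter,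
    List.foldl_map, foldl_union_eq_update, PySem.Set.empty,
    PySem.Set.update_nil_left]
  apply PySem.List.foldl_congr_mem
  intro acc x _
  rw [cntA_eq, count_flat]

-- ===== VERDICT (by name: the statement is the Claim_ definition above) =====
theorem get_frequent_itemset_singleton_spec : Claim_equal_get_frequent_itemset_singleton := by
  intro partition par_threshold _
  unfold Spec_get_frequent_itemset_singleton
  exact get_frequent_itemset_singleton_eq partition par_threshold
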